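-- pv_equiv track=rewrite | github.com/fivetran/api_framework | examples/pipelines/EHI/dev/connector_v1.py | categorize_and_sort_tables
-- ===== SOURCE A (Python) =====
-- from typing import Dict, List, Any, Optional, Tuple
--
-- SMALL_TABLE_THRESHOLD = 1000000  # 1M rows
--
-- LARGE_TABLE_THRESHOLD = 50000000  # 50M rows
--
-- def categorize_and_sort_tables(tables: List[str], table_sizes: Dict[str, int]) -> List[Tuple[str, str, int]]:
--     """Categorize tables by size and sort for optimal processing order.
--
--     Returns: List of tuples (table_name, category, row_count)
--     Categories: 'small', 'medium', 'large'
--     """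
--     categorized = []
--
--     for table in tables:
--         row_count = table_sizes.get(table, 0)
--
--         if row_count < SMALL_TABLE_THRESHOLD:
--             category = 'small'
--         elif row_count < LARGE_TABLE_THRESHOLD:
--             category = 'medium'
--         else:
--             category = 'large'
--
--         categorized.append((table, category, row_count))
--
--     # Sort by category (small first, then medium, then large) and by row count within each category
--     categorized.sort(key=lambda x: ('small', 'medium', 'large').index(x[1]) * 1000000000 + x[2])
--
--     return categorized
-- ===== SOURCE B (Python) =====
-- SMALL_TABLE_THRESHOLD = 1000000  # 1M rows
-- LARGE_TABLE_THRESHOLD = 50000000  # 50M rows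
--
-- def categorize_and_sort_tables(tables, table_sizes):
--     """Partition into category buckets, sort each bucket by row count, concatenate."""
--     small, medium, large = [], [], []
--     for table in tables:
--         row_count = table_sizes.get(table, 0)
--         if row_count < SMALL_TABLE_THRESHOLD:
--             small.append((table, 'small', row_count))
--         elif row_count < LARGE_TABLE_THRESHOLD:
--             medium.append((table, 'medium', row_count))
--         else:
--             large.append((table, 'large', row_count))
--     small.sort(key=lambda x: x[2])
--     medium.sort(key=lambda x: x[2])
--     large.sort(key=lambda x: x[2])
--     return small + medium + large
-- ===== Notes on version B (the rewrite author's own statement) =====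
-- stated objective: alternative
-- what changed: Replaces A's single sort with an arithmetic composite key (category index * 10^9 + row count) by a three-way partition into small/medium/large buckets, a stable per-bucket sort by row count alone, and concatenation.
import Mathlib
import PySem

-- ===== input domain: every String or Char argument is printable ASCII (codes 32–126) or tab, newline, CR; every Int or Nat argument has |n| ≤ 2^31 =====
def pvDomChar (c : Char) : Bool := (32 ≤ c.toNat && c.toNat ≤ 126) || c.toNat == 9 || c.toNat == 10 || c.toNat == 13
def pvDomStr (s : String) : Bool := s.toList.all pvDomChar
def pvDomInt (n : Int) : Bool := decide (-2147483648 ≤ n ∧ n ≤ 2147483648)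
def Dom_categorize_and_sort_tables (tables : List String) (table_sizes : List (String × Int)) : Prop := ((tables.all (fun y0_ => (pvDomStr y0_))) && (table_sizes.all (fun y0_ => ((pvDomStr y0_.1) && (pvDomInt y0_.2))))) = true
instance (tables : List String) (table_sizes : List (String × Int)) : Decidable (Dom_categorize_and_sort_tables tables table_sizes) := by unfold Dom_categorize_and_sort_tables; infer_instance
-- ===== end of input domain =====

-- B replaces A's single sort with a composite arithmetic key by partition into three
-- category buckets, a stable per-bucket sort by row count, and concatenation (alternative
-- decomposition, same asymptotic cost).

-- ===== PORT A =====
-- one row of A's `categorized` list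
def pvRowA (table_sizes : List (String × Int)) (table : String) : String × String × Int :=
  let row_count := PySem.Dict.getD (PySem.Dict.mk table_sizes) table 0
  let category := if row_count < 1000000 then "small"
                  else if row_count < 50000000 then "medium"
                  else "large"
  (table, category, row_count)

-- A's sort key: ('small','medium','large').index(x[1]) * 1000000000 + x[2].
-- tuple.index would raise ValueError on a missing element; here x[1] is always one of the
-- three strings, so the `.getD 0` default is never taken.
def pvKeyA (x : String × String × Int) : Int :=
  ((PySem.List.index? ["small", "medium", "large"] x.2.1).getD 0 : Int) * 1000000000 + x.2.2

def categorize_and_sort_tables (tables : List String) (table_sizes : List (String × Int)) : List (String × String × Int) :=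
  let categorized := tables.foldl (fun acc table => acc ++ [pvRowA table_sizes table]) []
  PySem.List.sorted categorized pvKeyA false

-- ===== PORT B =====
-- B's per-bucket sort key: x[2]
def pvKeyB (x : String × String × Int) : Int := x.2.2

-- the partition loop of Source B: one pass appending each row to its bucket
def pvPart (table_sizes : List (String × Int))
    (acc : List (String × String × Int) × List (String × String × Int) × List (String × String × Int))
    (table : String) :
    List (String × String × Int) × List (String × String × Int) × List (String × String × Int) :=
  let row_count := PySem.Dict.getD (PySem.Dict.mk table_sizes) table 0
  if row_count < 1000000 then (acc.1 ++ [(table, "small", row_count)], acc.2.1, acc.2.2)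
  else if row_count < 50000000 then (acc.1, acc.2.1 ++ [(table, "medium", row_count)], acc.2.2)
  else (acc.1, acc.2.1, acc.2.2 ++ [(table, "large", row_count)])

def categorize_and_sort_tables_alt (tables : List String) (table_sizes : List (String × Int)) : List (String × String × Int) :=
  let buckets := tables.foldl (pvPart table_sizes) ([], [], [])
  PySem.List.sorted buckets.1 pvKeyB false
    ++ PySem.List.sorted buckets.2.1 pvKeyB false
    ++ PySem.List.sorted buckets.2.2 pvKeyB false

-- ===== PRECONDITION & SPEC =====
def Spec_categorize_and_sort_tables (tables : List String) (table_sizes : List (String × Int)) (out : List (String × String × Int)) : Prop := out = categorize_and_sort_tables_alt tables table_sizes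
instance (tables : List String) (table_sizes : List (String × Int)) (out : List (String × String × Int)) : Decidable (Spec_categorize_and_sort_tables tables table_sizes out) := by unfold Spec_categorize_and_sort_tables; infer_instance

-- ===== CLAIM (what is proved, stated in full; the proofs are below) =====
def Claim_equal_categorize_and_sort_tables : Prop := ∀ (tables : List String) (table_sizes : List (String × Int)), Dom_categorize_and_sort_tables tables table_sizes → Spec_categorize_and_sort_tables tables table_sizes (categorize_and_sort_tables tables table_sizes)

-- ===== LEMMAS AND PROOFS =====

-- bucket membership predicates, phrased on the row count alone
def pvIsS (x : String × String × Int) : Bool := decide (x.2.2 < 1000000)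
def pvIsM (x : String × String × Int) : Bool := decide (1000000 ≤ x.2.2 ∧ x.2.2 < 50000000)
def pvIsL (x : String × String × Int) : Bool := decide (50000000 ≤ x.2.2)

-- every row A builds carries the category string matching its row count
def pvGood (x : String × String × Int) : Prop :=
  (x.2.2 < 1000000 ∧ x.2.1 = "small") ∨
  (1000000 ≤ x.2.2 ∧ x.2.2 < 50000000 ∧ x.2.1 = "medium") ∨
  (50000000 ≤ x.2.2 ∧ x.2.1 = "large")

lemma pvGood_rowA (table_sizes : List (String × Int)) (t : String) : pvGood (pvRowA table_sizes t) := by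
  simp only [pvGood, pvRowA]
  split_ifs with h1 h2 <;> simp <;> omega

-- key values of good rows
lemma pvKeyA_of_small {x : String × String × Int} (h : x.2.1 = "small") : pvKeyA x = x.2.2 := by
  unfold pvKeyA; rw [h]
  rw [show PySem.List.index? ["small", "medium", "large"] "small" = some 0 from by decide]
  simp

lemma pvKeyA_of_medium {x : String × String × Int} (h : x.2.1 = "medium") : pvKeyA x = 1000000000 + x.2.2 := by
  unfold pvKeyA; rw [h]
  rw [show PySem.List.index? ["small", "medium", "large"] "medium" = some 1 from by decide]
  simp

lemma pvKeyA_of_large {x : String × String × Int} (h : x.2.1 = "large") : pvKeyA x = 2000000000 + x.2.2 := by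
  unfold pvKeyA; rw [h]
  rw [show PySem.List.index? ["small", "medium", "large"] "large" = some 2 from by decide]
  norm_num

-- insertBy facts
lemma pvInsertBy_append_not {α : Type} (b : α → α → Bool) (x : α) (l1 l2 : List α)
    (h : ∀ y ∈ l1, b x y = false) :
    PySem.List.insertBy b x (l1 ++ l2) = l1 ++ PySem.List.insertBy b x l2 := by
  induction l1 with
  | nil => simp
  | cons y t ih =>
    have hy := h y (by simp)
    simp [PySem.List.insertBy, hy, ih (fun z hz => h z (by simp [hz]))]

lemma pvInsertBy_append_all {α : Type} (b : α → α → Bool) (x : α) (l1 l2 : List α)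
    (h : ∀ y ∈ l2, b x y = true) :
    PySem.List.insertBy b x (l1 ++ l2) = PySem.List.insertBy b x l1 ++ l2 := by
  induction l1 with
  | nil =>
    cases l2 with
    | nil => simp
    | cons z t => simp [PySem.List.insertBy, h z (by simp)]
  | cons y t ih =>
    by_cases hy : b x y = true
    · simp [PySem.List.insertBy, hy]
    · simp only [Bool.not_eq_true] at hy
      simp only [List.cons_append, PySem.List.insertBy, hy]
      simp [ih]

lemma pvInsertBy_congr {α : Type} (b1 b2 : α → α → Bool) (x : α) (l : List α)
    (h : ∀ y ∈ l, b1 x y = b2 x y) :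
    PySem.List.insertBy b1 x l = PySem.List.insertBy b2 x l := by
  induction l with
  | nil => rfl
  | cons y t ih =>
    have hy := h y (by simp)
    have ht := ih (fun z hz => h z (by simp [hz]))
    simp only [PySem.List.insertBy, hy, ht]

-- appending one element to a stable sort is one insertion
lemma pvSorted_append_singleton {α κ : Type} [LinearOrder κ] (ys : List α) (x : α) (key : α → κ) :
    PySem.List.sorted (ys ++ [x]) key false =
      PySem.List.insertBy (fun a b => decide (key a < key b)) x (PySem.List.sorted ys key false) := by
  rw [PySem.List.sorted_eq_foldl_insertBy, PySem.List.sorted_eq_foldl_insertBy, List.foldl_append]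
  rfl

-- the main decomposition: a stable sort by A's composite key of a list of good rows is the
-- concatenation of the stable sorts of its three buckets by row count
lemma pvMain (ys : List (String × String × Int)) (hg : ∀ x ∈ ys, pvGood x) :
    PySem.List.sorted ys pvKeyA false =
      PySem.List.sorted (ys.filter pvIsS) pvKeyB false
        ++ PySem.List.sorted (ys.filter pvIsM) pvKeyB false
        ++ PySem.List.sorted (ys.filter pvIsL) pvKeyB false := by
  induction ys using List.reverseRecOn with
  | nil => simp [PySem.List.sorted]
  | append_singleton ys x ih =>
    have hys : ∀ z ∈ ys, pvGood z := fun z hz => hg z (by simp [hz])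
    have hx : pvGood x := hg x (by simp)
    -- key bounds on the three sorted buckets, via membership
    have hSmem : ∀ y ∈ PySem.List.sorted (ys.filter pvIsS) pvKeyB false,
        pvKeyA y = y.2.2 ∧ y.2.2 < 1000000 := by
      intro y hy
      rw [PySem.List.mem_sorted] at hy
      obtain ⟨hyy, hp⟩ := List.mem_filter.mp hy
      have := hys y hyy
      simp only [pvIsS, decide_eq_true_eq] at hp
      rcases this with ⟨_, h⟩ | ⟨h1, _, _⟩ | ⟨h1, _⟩
      · exact ⟨pvKeyA_of_small h, hp⟩
      · omega
      · omega
    have hMmem : ∀ y ∈ PySem.List.sorted (ys.filter pvIsM) pvKeyB false,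
        pvKeyA y = 1000000000 + y.2.2 ∧ 1000000 ≤ y.2.2 ∧ y.2.2 < 50000000 := by
      intro y hy
      rw [PySem.List.mem_sorted] at hy
      obtain ⟨hyy, hp⟩ := List.mem_filter.mp hy
      have := hys y hyy
      simp only [pvIsM, decide_eq_true_eq] at hp
      rcases this with ⟨h1, _⟩ | ⟨_, _, h⟩ | ⟨h1, _⟩
      · omega
      · exact ⟨pvKeyA_of_medium h, hp⟩
      · omega
    have hLmem : ∀ y ∈ PySem.List.sorted (ys.filter pvIsL) pvKeyB false,
        pvKeyA y = 2000000000 + y.2.2 ∧ 50000000 ≤ y.2.2 := by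
      intro y hy
      rw [PySem.List.mem_sorted] at hy
      obtain ⟨hyy, hp⟩ := List.mem_filter.mp hy
      have := hys y hyy
      simp only [pvIsL, decide_eq_true_eq] at hp
      rcases this with ⟨h1, _⟩ | ⟨_, h1, _⟩ | ⟨_, h⟩
      · omega
      · omega
      · exact ⟨pvKeyA_of_large h, hp⟩
    rw [pvSorted_append_singleton, ih hys,
        List.filter_append, List.filter_append, List.filter_append]
    rcases hx with ⟨hlt, hcat⟩ | ⟨hge, hlt, hcat⟩ | ⟨hge, hcat⟩
    · -- x is small
      have hkx : pvKeyA x = x.2.2 := pvKeyA_of_small hcat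
      have hfS : List.filter pvIsS [x] = [x] := by simp [pvIsS, hlt]
      have hfM : List.filter pvIsM [x] = [] := by simp [pvIsM]; omega
      have hfL : List.filter pvIsL [x] = [] := by simp [pvIsL]; omega
      rw [hfS, hfM, hfL, List.append_nil, List.append_nil,
          pvSorted_append_singleton, List.append_assoc,
          pvInsertBy_append_all _ x _ _ (by
            intro y hy
            rcases List.mem_append.mp hy with hy | hy
            · have := hMmem y hy
              simp only [hkx, this.1, decide_eq_true_eq]; omega
            · have := hLmem y hy
              simp only [hkx, this.1, decide_eq_true_eq]; omega),
          pvInsertBy_congr _ (fun a b => decide (pvKeyB a < pvKeyB b)) x _ (by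
            intro y hy
            have := hSmem y hy
            simp only [hkx, this.1, pvKeyB, decide_eq_decide])]
      simp [List.append_assoc]
    · -- x is medium
      have hkx : pvKeyA x = 1000000000 + x.2.2 := pvKeyA_of_medium hcat
      have hfS : List.filter pvIsS [x] = [] := by simp [pvIsS]; omega
      have hfM : List.filter pvIsM [x] = [x] := by simp [pvIsM]; omega
      have hfL : List.filter pvIsL [x] = [] := by simp [pvIsL]; omega
      rw [hfS, hfM, hfL, List.append_nil, List.append_nil,
          pvSorted_append_singleton, List.append_assoc,
          pvInsertBy_append_not _ x _ _ (by
            intro y hy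
            have := hSmem y hy
            simp only [hkx, this.1, decide_eq_false_iff_not]; omega),
          pvInsertBy_append_all _ x _ _ (by
            intro y hy
            have := hLmem y hy
            simp only [hkx, this.1, decide_eq_true_eq]; omega),
          pvInsertBy_congr _ (fun a b => decide (pvKeyB a < pvKeyB b)) x _ (by
            intro y hy
            have := hMmem y hy
            simp only [hkx, this.1, pvKeyB, decide_eq_decide]
            omega)]
      simp [List.append_assoc]
    · -- x is large
      have hkx : pvKeyA x = 2000000000 + x.2.2 := pvKeyA_of_large hcat
      have hfS : List.filter pvIsS [x] = [] := by simp [pvIsS]; omega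
      have hfM : List.filter pvIsM [x] = [] := by simp [pvIsM]; omega
      have hfL : List.filter pvIsL [x] = [x] := by simp [pvIsL]; omega
      rw [hfS, hfM, hfL, List.append_nil, List.append_nil,
          pvSorted_append_singleton,
          pvInsertBy_append_not _ x _ _ (by
            intro y hy
            rcases List.mem_append.mp hy with hy | hy
            · have := hSmem y hy
              simp only [hkx, this.1, decide_eq_false_iff_not]; omega
            · have := hMmem y hy
              simp only [hkx, this.1, decide_eq_false_iff_not]; omega),
          pvInsertBy_congr _ (fun a b => decide (pvKeyB a < pvKeyB b)) x _ (by
            intro y hy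
            have := hLmem y hy
            simp only [hkx, this.1, pvKeyB, decide_eq_decide]
            omega)]

-- B's partition loop builds exactly the three filters of A's categorized list
lemma pvPart_eq (table_sizes : List (String × Int)) (tables : List String)
    (s0 m0 l0 : List (String × String × Int)) :
    tables.foldl (pvPart table_sizes) (s0, m0, l0) =
      (s0 ++ (tables.map (pvRowA table_sizes)).filter pvIsS,
       m0 ++ (tables.map (pvRowA table_sizes)).filter pvIsM,
       l0 ++ (tables.map (pvRowA table_sizes)).filter pvIsL) := by
  induction tables generalizing s0 m0 l0 with
  | nil => simp
  | cons t ts ih =>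
    simp only [List.foldl_cons, List.map_cons, List.filter_cons]
    by_cases h1 : PySem.Dict.getD (PySem.Dict.mk table_sizes) t 0 < 1000000
    · have hrA : pvRowA table_sizes t =
          (t, "small", PySem.Dict.getD (PySem.Dict.mk table_sizes) t 0) := by
        simp [pvRowA, h1]
      have hstep : pvPart table_sizes (s0, m0, l0) t =
          (s0 ++ [(t, "small", PySem.Dict.getD (PySem.Dict.mk table_sizes) t 0)], m0, l0) := by
        simp [pvPart, h1]
      rw [hstep, ih, hrA]
      have e2 : ¬ (1000000 ≤ PySem.Dict.getD (PySem.Dict.mk table_sizes) t 0 ∧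
          PySem.Dict.getD (PySem.Dict.mk table_sizes) t 0 < 50000000) := by omega
      have e3 : ¬ (50000000 ≤ PySem.Dict.getD (PySem.Dict.mk table_sizes) t 0) := by omega
      simp [pvIsS, pvIsM, pvIsL, h1, e2, e3]
    · by_cases h2 : PySem.Dict.getD (PySem.Dict.mk table_sizes) t 0 < 50000000
      · have hrA : pvRowA table_sizes t =
            (t, "medium", PySem.Dict.getD (PySem.Dict.mk table_sizes) t 0) := by
          simp [pvRowA, h1, h2]
        have hstep : pvPart table_sizes (s0, m0, l0) t =
            (s0, m0 ++ [(t, "medium", PySem.Dict.getD (PySem.Dict.mk table_sizes) t 0)], l0) := by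
          simp [pvPart, h1, h2]
        rw [hstep, ih, hrA]
        have e2 : 1000000 ≤ PySem.Dict.getD (PySem.Dict.mk table_sizes) t 0 ∧
            PySem.Dict.getD (PySem.Dict.mk table_sizes) t 0 < 50000000 := by omega
        have e3 : ¬ (50000000 ≤ PySem.Dict.getD (PySem.Dict.mk table_sizes) t 0) := by omega
        simp [pvIsS, pvIsM, pvIsL, h1, e2, e3]
      · have hrA : pvRowA table_sizes t =
            (t, "large", PySem.Dict.getD (PySem.Dict.mk table_sizes) t 0) := by
          simp [pvRowA, h1, h2]
        have hstep : pvPart table_sizes (s0, m0, l0) t =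
            (s0, m0, l0 ++ [(t, "large", PySem.Dict.getD (PySem.Dict.mk table_sizes) t 0)]) := by
          simp [pvPart, h1, h2]
        rw [hstep, ih, hrA]
        have e2 : ¬ (1000000 ≤ PySem.Dict.getD (PySem.Dict.mk table_sizes) t 0 ∧
            PySem.Dict.getD (PySem.Dict.mk table_sizes) t 0 < 50000000) := by omega
        have e3 : 50000000 ≤ PySem.Dict.getD (PySem.Dict.mk table_sizes) t 0 := by omega
        simp [pvIsS, pvIsM, pvIsL, h1, e2, e3]

-- ===== VERDICT (by name: the statement is the Claim_ definition above) =====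
theorem categorize_and_sort_tables_spec : Claim_equal_categorize_and_sort_tables := by
  intro tables table_sizes _
  unfold Spec_categorize_and_sort_tables categorize_and_sort_tables categorize_and_sort_tables_alt
  rw [PySem.List.foldl_append_singleton_eq_map, List.nil_append, pvPart_eq]
  simp only [List.nil_append]
  exact pvMain _ (by intro x hx; obtain ⟨t, _, rfl⟩ := List.mem_map.mp hx; exact pvGood_rowA _ t)
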